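-- pv_equiv track=rewrite | github.com/python-unsam/Programacion_en_Python_UNSAM | Ejercicios/Clase05/clase_5.py | envido
-- ===== SOURCE A (Python) =====
-- def envido(cartas_tupla):
--     envidos_posibles = [0]
--     cartas = [list(carta) for carta in cartas_tupla]
--
--     # 10,11,12 valen 0 en el envido
--     for carta in cartas:
--         if carta[0] in [10,11,12]:
--             carta[0] = 0
--
--     for carta in cartas:
--         for carta2 in cartas:
--             if carta == carta2:
--                 continue
--             if carta[1] == carta2[1]:
--                 envidos_posibles.append(carta[0]+carta2[0]+20)
--
--     return(max(envidos_posibles))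
-- ===== SOURCE B (Python) =====
-- def envido(cartas_tupla):
--     # group the transformed values (10/11/12 -> 0) by suit, as sets of distinct values
--     por_palo = {}
--     for valor, palo in cartas_tupla:
--         if valor in (10, 11, 12):
--             valor = 0
--         por_palo[palo] = por_palo.get(palo, set()) | {valor}
--     best = 0
--     for valores in por_palo.values():
--         if len(valores) >= 2:
--             srt = sorted(valores)
--             a = srt[len(srt) - 2]
--             b = srt[len(srt) - 1]
--             best = max(best, a + b + 20)
--     return best
-- ===== Notes on version B (the rewrite author's own statement) =====
-- stated objective: faster
-- what changed: Replaced the all-pairs double loop over cards with a single grouping pass into a suit -> set-of-distinct-transformed-values dict, then one pass taking each suit's two largest distinct values.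
import Mathlib
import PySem

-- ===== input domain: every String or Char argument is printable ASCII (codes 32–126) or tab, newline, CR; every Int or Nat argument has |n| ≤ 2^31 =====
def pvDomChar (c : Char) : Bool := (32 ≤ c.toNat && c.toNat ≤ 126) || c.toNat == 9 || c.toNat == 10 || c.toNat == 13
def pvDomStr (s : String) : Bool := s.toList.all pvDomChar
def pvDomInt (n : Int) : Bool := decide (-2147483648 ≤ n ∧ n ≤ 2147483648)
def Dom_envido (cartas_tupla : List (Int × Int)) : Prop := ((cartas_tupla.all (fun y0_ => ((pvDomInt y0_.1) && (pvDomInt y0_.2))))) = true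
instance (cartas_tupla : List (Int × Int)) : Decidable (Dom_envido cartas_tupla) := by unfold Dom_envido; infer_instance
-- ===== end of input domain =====

-- B replaces A's all-pairs double loop with a group-by-suit dict of distinct-value sets
-- plus a per-suit top-two computation (simpler/faster single grouping pass).

-- ===== PORT A =====
def envido (cartas_tupla : List (Int × Int)) : Int :=
  -- envidos_posibles = [0]; cartas = copies of the tuples; 10,11,12 -> 0
  let cartas := cartas_tupla.map (fun carta =>
    if carta.1 ∈ ([10, 11, 12] : List Int) then ((0 : Int), carta.2) else carta)
  let envidos_posibles := cartas.foldl (fun acc carta =>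
    cartas.foldl (fun acc2 carta2 =>
      if carta = carta2 then acc2
      else if carta.2 = carta2.2 then acc2 ++ [carta.1 + carta2.1 + 20]
      else acc2) acc) [(0 : Int)]
  match PySem.List.max? envidos_posibles (fun x => x) with
  | some m => m
  | none => 0  -- unreachable: envidos_posibles contains 0

-- ===== PORT B =====
def envido_alt (cartas_tupla : List (Int × Int)) : Int :=
  let por_palo := cartas_tupla.foldl (fun d c =>
    let valor := if c.1 = 10 ∨ c.1 = 11 ∨ c.1 = 12 then (0 : Int) else c.1
    d.modify c.2 PySem.Set.empty (fun st => PySem.Set.add st valor)) PySem.Dict.empty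
  (PySem.Dict.values por_palo).foldl (fun best valores =>
    if (2 : Int) ≤ PySem.Set.len valores then
      let srt := PySem.List.sorted valores (fun x => x) false
      let a := PySem.List.pyGetD srt (PySem.List.len srt - 2) 0
      let b := PySem.List.pyGetD srt (PySem.List.len srt - 1) 0
      max best (a + b + 20)
    else best) 0

-- ===== PRECONDITION & SPEC =====
def Spec_envido (cartas_tupla : List (Int × Int)) (out : Int) : Prop := out = envido_alt cartas_tupla
instance (cartas_tupla : List (Int × Int)) (out : Int) : Decidable (Spec_envido cartas_tupla out) := by unfold Spec_envido; infer_instance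

-- ===== CLAIM (what is proved, stated in full; the proofs are below) =====
def Claim_equal_envido : Prop := ∀ (cartas_tupla : List (Int × Int)), Dom_envido cartas_tupla → Spec_envido cartas_tupla (envido cartas_tupla)

-- ===== LEMMAS AND PROOFS =====

-- the transformed hand (10/11/12 ↦ 0), shared vocabulary of both characterisations
def pvT (l : List (Int × Int)) : List (Int × Int) :=
  l.map (fun c => if c.1 ∈ ([10, 11, 12] : List Int) then ((0 : Int), c.2) else c)

-- the candidate envido values: two cards of the same suit whose transformed pairs differ
def pvCand (l : List (Int × Int)) (x : Int) : Prop :=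
  ∃ u v s : Int, (u, s) ∈ pvT l ∧ (v, s) ∈ pvT l ∧ u ≠ v ∧ x = u + v + 20

-- transformed values of suit s
def pvVals (l : List (Int × Int)) (s : Int) : List Int :=
  ((pvT l).filter (fun c => c.2 == s)).map (·.1)

lemma pvMemVals {l : List (Int × Int)} {s x : Int} :
    x ∈ pvVals l s ↔ (x, s) ∈ pvT l := by
  simp only [pvVals, List.mem_map, List.mem_filter, beq_iff_eq]
  constructor
  · rintro ⟨c, ⟨hc, h2⟩, h1⟩
    have : c = (x, s) := by cases c; simp_all
    exact this ▸ hc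
  · intro h; exact ⟨(x, s), ⟨h, rfl⟩, rfl⟩

-- ---------- A's characterisation ----------

lemma pvA_list (l : List (Int × Int)) :
    (pvT l).foldl (fun acc carta =>
      (pvT l).foldl (fun acc2 carta2 =>
        if carta = carta2 then acc2
        else if carta.2 = carta2.2 then acc2 ++ [carta.1 + carta2.1 + 20]
        else acc2) acc) [(0 : Int)]
    = 0 :: (pvT l).flatMap (fun c =>
        ((pvT l).filter (fun c2 => decide (¬ c = c2 ∧ c.2 = c2.2))).map
          (fun c2 => c.1 + c2.1 + 20)) := by
  have hin : ∀ (c : Int × Int) (acc : List Int),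
      (pvT l).foldl (fun acc2 c2 =>
        if c = c2 then acc2
        else if c.2 = c2.2 then acc2 ++ [c.1 + c2.1 + 20]
        else acc2) acc
      = acc ++ ((pvT l).filter (fun c2 => decide (¬ c = c2 ∧ c.2 = c2.2))).map
          (fun c2 => c.1 + c2.1 + 20) := by
    intro c acc
    have hfun : (fun (acc2 : List Int) c2 =>
        if c = c2 then acc2
        else if c.2 = c2.2 then acc2 ++ [c.1 + c2.1 + 20]
        else acc2)
      = (fun (acc2 : List Int) c2 =>
        if (¬ c = c2 ∧ c.2 = c2.2) then acc2 ++ [c.1 + c2.1 + 20] else acc2) := by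
      funext acc2 c2
      by_cases h1 : c = c2 <;> by_cases h2 : c.2 = c2.2 <;> simp [h1, h2]
    rw [hfun, PySem.List.foldl_append_ite]
  have := PySem.List.foldl_append_eq_flatMap
    (g := fun c => ((pvT l).filter (fun c2 => decide (¬ c = c2 ∧ c.2 = c2.2))).map
          (fun c2 => c.1 + c2.1 + 20)) (l := pvT l) (acc := [(0 : Int)])
  calc (pvT l).foldl _ [(0 : Int)]
      = (pvT l).foldl (fun acc c => acc ++ ((pvT l).filter (fun c2 => decide (¬ c = c2 ∧ c.2 = c2.2))).map
          (fun c2 => c.1 + c2.1 + 20)) [(0 : Int)] := by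
        apply PySem.List.foldl_congr_mem; intro acc c _; exact hin c acc
    _ = _ := by rw [this]; rfl

lemma pvMemA {l : List (Int × Int)} {x : Int} :
    x ∈ (0 :: (pvT l).flatMap (fun c =>
        ((pvT l).filter (fun c2 => decide (¬ c = c2 ∧ c.2 = c2.2))).map
          (fun c2 => c.1 + c2.1 + 20))) ↔ x = 0 ∨ pvCand l x := by
  simp only [List.mem_cons, List.mem_flatMap, List.mem_map, List.mem_filter,
    decide_eq_true_eq, pvCand]
  constructor
  · rintro (h | ⟨c, hc, c2, ⟨hc2, hne, hsuit⟩, hx⟩)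
    · exact Or.inl h
    · refine Or.inr ⟨c.1, c2.1, c.2, by simpa using hc, ?_, ?_, hx.symm⟩
      · rw [hsuit]; simpa using hc2
      · intro h; apply hne; cases c; cases c2; simp_all
  · rintro (h | ⟨u, v, s, hu, hv, huv, hx⟩)
    · exact Or.inl h
    · exact Or.inr ⟨(u, s), hu, (v, s), ⟨hv, by simp [huv], rfl⟩, hx.symm⟩

lemma pvA_props (l : List (Int × Int)) :
    (envido l = 0 ∨ pvCand l (envido l)) ∧ 0 ≤ envido l ∧
      ∀ x, pvCand l x → x ≤ envido l := by
  have hL := pvA_list l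
  set L := (0 : Int) :: (pvT l).flatMap (fun c =>
        ((pvT l).filter (fun c2 => decide (¬ c = c2 ∧ c.2 = c2.2))).map
          (fun c2 => c.1 + c2.1 + 20)) with hLdef
  unfold pvT at hL
  have hA : envido l = match PySem.List.max? L (fun x => x) with
      | some m => m | none => 0 := by
    simp only [envido]
    rw [hL]
  obtain ⟨m, hm⟩ : ∃ m, PySem.List.max? L (fun x => x) = some m := by
    rcases h : PySem.List.max? L (fun x => x) with _ | m
    · rw [PySem.List.max?_eq_none_iff] at h; simp [hLdef] at h
    · exact ⟨m, rfl⟩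
  have hAm : envido l = m := by rw [hA, hm]
  have hmem : m ∈ L := PySem.List.max?_mem hm
  have hmax : ∀ y ∈ L, y ≤ m := fun y hy => PySem.List.max?_isMax hm y hy
  refine ⟨by rw [hAm]; exact (pvMemA).1 hmem, ?_, ?_⟩
  · rw [hAm]; exact hmax 0 (by simp [hLdef])
  · intro x hx; rw [hAm]; exact hmax x ((pvMemA).2 (Or.inr hx))

-- ---------- B's characterisation ----------

lemma pvGroup_getD (l : List (Int × Int)) (d : PySem.Dict Int (PySem.Set Int)) (s : Int) :
    (l.foldl (fun d c => d.modify c.2 PySem.Set.empty (fun st => PySem.Set.add st c.1)) d).getD s PySem.Set.empty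
      = PySem.Set.update (d.getD s PySem.Set.empty) ((l.filter (fun c => c.2 == s)).map (·.1)) := by
  induction l generalizing d with
  | nil => simp [PySem.Set.update]
  | cons c t ih =>
    rw [List.foldl_cons, ih]
    by_cases h : c.2 = s
    · simp [h, PySem.Set.update]
    · simp [h, Ne.symm h, PySem.Dict.getD_modify]

lemma pvTwo_le_length {L : List Int} {u v : Int} (hu : u ∈ L) (hv : v ∈ L)
    (huv : u ≠ v) : 2 ≤ L.length := by
  match L, hu with
  | [x], hu => simp_all
  | x :: y :: t, _ => simp
  
-- per-suit: the two largest distinct values bound every distinct pair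
lemma pvSuit (vals : List Int) (h2 : 2 ≤ (PySem.Set.ofList vals).length)
    {srt : List Int} (hsrt : srt = PySem.List.sorted (PySem.Set.ofList vals) (fun x => x) false)
    {a b : Int} (ha : a = PySem.List.pyGetD srt (PySem.List.len srt - 2) 0)
    (hb : b = PySem.List.pyGetD srt (PySem.List.len srt - 1) 0) :
    a ∈ PySem.Set.ofList vals ∧ b ∈ PySem.Set.ofList vals ∧ a ≠ b ∧
      ∀ u v : Int, u ∈ PySem.Set.ofList vals → v ∈ PySem.Set.ofList vals → u ≠ v →
        u + v ≤ a + b := by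
  have hperm : srt.Perm (PySem.Set.ofList vals) := hsrt ▸ PySem.List.sorted_perm _ _ _
  have hn : 2 ≤ srt.length := by rw [hperm.length_eq]; exact h2
  have hstrict : srt.Pairwise (· < ·) := hsrt ▸ PySem.List.sorted_ofList_pairwise_lt vals
  have hgetidx : ∀ (k : Nat), ∀ _hk1 : 0 < k, ∀ _hk2 : k ≤ srt.length,
      PySem.List.pyGetD srt (PySem.List.len srt - (k : Int)) 0
        = srt[srt.length - k]'(by omega) := by
    intro k hk1 hk2
    have hcast : PySem.List.len srt - (k : Int) = ((srt.length - k : Nat) : Int) := by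
      simp only [PySem.List.len_eq, Nat.cast_sub hk2]
    rw [hcast, PySem.List.pyGetD_natCast, List.getD_eq_getElem _ _ (by omega)]
  have ha' : a = srt[srt.length - 2]'(by omega) := by
    rw [ha]; exact hgetidx 2 (by omega) (by omega)
  have hb' : b = srt[srt.length - 1]'(by omega) := by
    rw [hb]; exact hgetidx 1 (by omega) (by omega)
  have hmono := List.pairwise_iff_getElem.mp hstrict
  have hab : a < b := by
    rw [ha', hb']; exact hmono _ _ (by omega) (by omega) (by omega)
  have hub : ∀ x ∈ srt, x ≤ b := by
    intro x hx
    obtain ⟨i, hi, rfl⟩ := List.mem_iff_getElem.mp hx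
    rcases Nat.lt_or_ge i (srt.length - 1) with h | h
    · exact le_of_lt (hb' ▸ hmono _ _ hi (by omega) h)
    · have : i = srt.length - 1 := by omega
      subst this; rw [hb']
  have hub2 : ∀ x ∈ srt, x ≠ b → x ≤ a := by
    intro x hx hxb
    obtain ⟨i, hi, rfl⟩ := List.mem_iff_getElem.mp hx
    have hi2 : i ≤ srt.length - 2 := by
      rcases Nat.lt_or_ge i (srt.length - 1) with h | h
      · omega
      · exfalso; apply hxb; have : i = srt.length - 1 := by omega
        subst this; rw [hb']
    rcases Nat.lt_or_ge i (srt.length - 2) with h | h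
    · exact le_of_lt (ha' ▸ hmono _ _ hi (by omega) h)
    · have : i = srt.length - 2 := by omega
      subst this; rw [ha']
  refine ⟨hperm.mem_iff.mp (ha' ▸ List.getElem_mem _),
          hperm.mem_iff.mp (hb' ▸ List.getElem_mem _), ne_of_lt hab, ?_⟩
  intro u v hu hv huv
  have hu' : u ∈ srt := hperm.mem_iff.mpr hu
  have hv' : v ∈ srt := hperm.mem_iff.mpr hv
  by_cases hub' : u = b
  · subst hub'
    have : v ≤ a := hub2 v hv' (fun h => huv h.symm)
    omega
  · have h1 : u ≤ a := hub2 u hu' hub'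
    have h2 : v ≤ b := hub v hv'
    omega

lemma pvFoldl_max_guard {α : Type} (L : List α) (P : α → Prop) [DecidablePred P]
    (g : α → Int) (init : Int) :
    init ≤ L.foldl (fun b x => if P x then max b (g x) else b) init ∧
    (∀ x ∈ L, P x → g x ≤ L.foldl (fun b x => if P x then max b (g x) else b) init) ∧
    (L.foldl (fun b x => if P x then max b (g x) else b) init = init ∨
      ∃ x ∈ L, P x ∧ L.foldl (fun b x => if P x then max b (g x) else b) init = g x) := by
  induction L generalizing init with
  | nil => simp
  | cons y t ih =>
    by_cases hy : P y
    · obtain ⟨h1, h2, h3⟩ := ih (max init (g y))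
      simp only [List.foldl_cons, if_pos hy]
      refine ⟨le_trans (le_max_left _ _) h1, ?_, ?_⟩
      · intro x hx hPx
        rcases List.mem_cons.mp hx with rfl | hx'
        · exact le_trans (le_max_right _ _) h1
        · exact h2 x hx' hPx
      · rcases h3 with h | ⟨x, hx, hPx, hval⟩
        · rcases max_cases init (g y) with ⟨he, _⟩ | ⟨he, _⟩
          · exact Or.inl (h.trans he)
          · exact Or.inr ⟨y, by simp, hy, h.trans he⟩
        · exact Or.inr ⟨x, by simp [hx], hPx, hval⟩
    · obtain ⟨h1, h2, h3⟩ := ih init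
      simp only [List.foldl_cons, if_neg hy]
      refine ⟨h1, ?_, ?_⟩
      · intro x hx hPx
        rcases List.mem_cons.mp hx with rfl | hx'
        · exact absurd hPx hy
        · exact h2 x hx' hPx
      · rcases h3 with h | ⟨x, hx, hPx, hval⟩
        · exact Or.inl h
        · exact Or.inr ⟨x, by simp [hx], hPx, hval⟩

-- the per-suit contribution B computes (sorted set, sum of the last two, +20)
def pvG (vs : PySem.Set Int) : Int :=
  PySem.List.pyGetD (PySem.List.sorted vs (fun x => x) false)
      (PySem.List.len (PySem.List.sorted vs (fun x => x) false) - 2) 0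
  + PySem.List.pyGetD (PySem.List.sorted vs (fun x => x) false)
      (PySem.List.len (PySem.List.sorted vs (fun x => x) false) - 1) 0
  + 20

lemma pvB_props (l : List (Int × Int)) :
    (envido_alt l = 0 ∨ pvCand l (envido_alt l)) ∧ 0 ≤ envido_alt l ∧
      ∀ x, pvCand l x → x ≤ envido_alt l := by
  have hstep : (fun (d : PySem.Dict Int (PySem.Set Int)) (c : Int × Int) =>
        d.modify c.2 PySem.Set.empty (fun st => PySem.Set.add st
          (if c.1 = 10 ∨ c.1 = 11 ∨ c.1 = 12 then (0 : Int) else c.1)))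
      = (fun d c =>
        (fun (d : PySem.Dict Int (PySem.Set Int)) (c : Int × Int) =>
          d.modify c.2 PySem.Set.empty (fun st => PySem.Set.add st c.1))
        d (if c.1 ∈ ([10, 11, 12] : List Int) then ((0 : Int), c.2) else c)) := by
    funext d c
    by_cases h : c.1 = 10 ∨ c.1 = 11 ∨ c.1 = 12 <;> simp [h]
  have hfold : l.foldl (fun (d : PySem.Dict Int (PySem.Set Int)) (c : Int × Int) =>
        d.modify c.2 PySem.Set.empty (fun st => PySem.Set.add st
          (if c.1 = 10 ∨ c.1 = 11 ∨ c.1 = 12 then (0 : Int) else c.1))) PySem.Dict.empty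
      = (pvT l).foldl (fun d c =>
          d.modify c.2 PySem.Set.empty (fun st => PySem.Set.add st c.1)) PySem.Dict.empty := by
    rw [hstep, pvT, List.foldl_map]
  set d := (pvT l).foldl (fun d c =>
      d.modify c.2 PySem.Set.empty (fun st => PySem.Set.add st c.1)) PySem.Dict.empty with hd
  have hkeys : d.keys = PySem.Set.ofList ((pvT l).map (·.2)) := by
    rw [hd, PySem.Dict.keys_foldl_modify_key]
    simp [PySem.Set.update_nil_left]
  have hnodup : d.keys.Nodup := by rw [hkeys]; exact PySem.Set.nodup_ofList _
  have hget : ∀ s : Int, d.getD s PySem.Set.empty = PySem.Set.ofList (pvVals l s) := by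
    intro s
    rw [hd, pvGroup_getD]
    simp [PySem.Set.update_nil_left, pvVals]
  have hvalues : d.values = d.keys.map (fun k => d.getD k PySem.Set.empty) :=
    PySem.Dict.values_eq_map_keys d hnodup PySem.Set.empty
  have hBr : envido_alt l = d.values.foldl
      (fun best vs => if (2 : Int) ≤ PySem.Set.len vs then max best (pvG vs) else best) 0 := by
    simp only [envido_alt, pvG]
    rw [hfold]
  have hlenb : ∀ vs : PySem.Set Int, ((2 : Int) ≤ PySem.Set.len vs) ↔ 2 ≤ vs.length := by
    intro vs
    simp only [PySem.Set.len]
    omega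
  obtain ⟨h1, h2, h3⟩ := pvFoldl_max_guard d.values
    (fun vs => (2 : Int) ≤ PySem.Set.len vs) pvG 0
  -- every suit set appearing in values comes from a key
  have hvs_of_mem : ∀ vs ∈ d.values, ∃ s : Int, vs = PySem.Set.ofList (pvVals l s) := by
    intro vs hvs
    rw [hvalues] at hvs
    obtain ⟨k, _, rfl⟩ := List.mem_map.mp hvs
    exact ⟨k, hget k⟩
  refine ⟨?_, by rw [hBr]; exact h1, ?_⟩
  · rcases h3 with h | ⟨vs, hvs, hP, hval⟩
    · exact Or.inl (by rw [hBr, h])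
    · right
      obtain ⟨s, rfl⟩ := hvs_of_mem vs hvs
      have h2len : 2 ≤ (PySem.Set.ofList (pvVals l s)).length := (hlenb _).mp hP
      obtain ⟨hha, hhb, hhab, _⟩ := pvSuit (pvVals l s) h2len rfl rfl rfl
      refine ⟨_, _, s, pvMemVals.mp ((PySem.Set.mem_ofList _ _).mp hha),
        pvMemVals.mp ((PySem.Set.mem_ofList _ _).mp hhb), hhab, ?_⟩
      rw [hBr, hval]; rfl
  · rintro x ⟨u, v, s, hu, hv, huv, rfl⟩
    have hsk : s ∈ d.keys := by
      rw [hkeys]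
      exact (PySem.Set.mem_ofList _ _).mpr (List.mem_map.mpr ⟨(u, s), hu, rfl⟩)
    have hvsmem : d.getD s PySem.Set.empty ∈ d.values := by
      rw [hvalues]; exact List.mem_map_of_mem hsk
    have hu' : u ∈ PySem.Set.ofList (pvVals l s) :=
      (PySem.Set.mem_ofList _ _).mpr (pvMemVals.mpr hu)
    have hv' : v ∈ PySem.Set.ofList (pvVals l s) :=
      (PySem.Set.mem_ofList _ _).mpr (pvMemVals.mpr hv)
    have h2len : 2 ≤ (PySem.Set.ofList (pvVals l s)).length :=
      pvTwo_le_length hu' hv' huv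
    obtain ⟨_, _, _, hbound⟩ := pvSuit (pvVals l s) h2len rfl rfl rfl
    have hPs : (2 : Int) ≤ PySem.Set.len (d.getD s PySem.Set.empty) := by
      rw [hget s]; exact (hlenb _).mpr h2len
    have hg : pvG (d.getD s PySem.Set.empty) ≤ d.values.foldl
        (fun best vs => if (2 : Int) ≤ PySem.Set.len vs then max best (pvG vs) else best) 0 :=
      h2 _ hvsmem hPs
    have hx : u + v + 20 ≤ pvG (d.getD s PySem.Set.empty) := by
      have := hbound u v hu' hv' huv
      rw [hget s]
      unfold pvG
      omega
    rw [hBr]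
    omega

-- ===== VERDICT (by name: the statement is the Claim_ definition above) =====
theorem envido_spec : Claim_equal_envido := by
  intro l _
  unfold Spec_envido
  obtain ⟨ha1, ha2, ha3⟩ := pvA_props l
  obtain ⟨hb1, hb2, hb3⟩ := pvB_props l
  apply le_antisymm
  · rcases ha1 with h | h
    · rw [h]; exact hb2
    · exact hb3 _ h
  · rcases hb1 with h | h
    · rw [h]; exact ha2
    · exact ha3 _ h
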